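-- pv_equiv track=rewrite | github.com/huytq000605/CF-CP | Educational Codeforces Round 135 (Rated for Div. 2)/B.py | solve
-- ===== SOURCE A (Python) =====
-- def solve(n):
--     result = [i+1 for i in range(n)]
--     # What we need is n pairs with n-1
--     # Prove: The last number must be n, to not cancel it, we need sum before it to be n-1
--
--     # There are only 2 cases
--     # If n is even, we can just use 2 number to cancel each other from the start
--     # If n is odd, [1,2,3] will be zero and we'll have even
--     if n % 2 == 0:
--         for i in range(0, n-2, 2):
--             result[i], result[i+1] = result[i+1], result[i]
--     else:
--         for i in range(3, n-2, 2):
--             result[i], result[i+1] = result[i+1], result[i]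
--     return " ".join(map(str, result))
-- ===== SOURCE B (Python) =====
-- def solve(n):
--     # single pass: compute each position's value directly from a parity/range rule
--     def val(i):
--         if n % 2 == 0:
--             if i < n - 2:
--                 return i + 2 if i % 2 == 0 else i
--             return i + 1
--         if i % 2 == 1 and 3 <= i < n - 2:
--             return i + 2
--         if i % 2 == 0 and 4 <= i < n - 1:
--             return i
--         return i + 1
--     return " ".join(str(val(i)) for i in range(n))
-- ===== Notes on version B (the rewrite author's own statement) =====
-- stated objective: simpler
-- what changed: Replaces A's build-identity-list-then-swap-adjacent-pairs-in-place loops by a single pass that computes each position's value directly from a closed parity/range rule and joins it.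
import Mathlib
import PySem

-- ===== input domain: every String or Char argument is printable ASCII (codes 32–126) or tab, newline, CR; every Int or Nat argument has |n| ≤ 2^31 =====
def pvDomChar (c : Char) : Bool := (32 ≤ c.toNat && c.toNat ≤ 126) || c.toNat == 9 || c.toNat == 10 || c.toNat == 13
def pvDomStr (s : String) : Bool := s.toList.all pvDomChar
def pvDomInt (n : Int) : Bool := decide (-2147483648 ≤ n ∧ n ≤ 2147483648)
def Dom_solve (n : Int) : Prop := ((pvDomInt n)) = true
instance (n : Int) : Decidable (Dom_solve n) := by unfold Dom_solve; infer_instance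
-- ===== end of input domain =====

-- B replaces A's build-identity-then-swap-in-place loop by a single pass computing each
-- position's value from a closed parity/range rule (objective: simpler decomposition).

-- ===== PORT A =====
-- tuple swap result[i], result[i+1] = result[i+1], result[i]; the indices the ranges
-- produce are nonnegative and in bounds, so pySetD/pyGetD are exact here
def swapStep (r : List Int) (i : Int) : List Int :=
  PySem.List.pySetD (PySem.List.pySetD r i (PySem.List.pyGetD r (i + 1) 0)) (i + 1)
    (PySem.List.pyGetD r i 0)

def solve (n : Int) : String :=
  let result := (PySem.List.pyRange 0 n 1).map (fun i => i + 1)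
  let result2 :=
    if PySem.Int.mod n 2 == 0 then
      (PySem.List.pyRange 0 (n - 2) 2).foldl swapStep result
    else
      (PySem.List.pyRange 3 (n - 2) 2).foldl swapStep result
  PySem.Str.join " " (result2.map PySem.Int.toStr)

-- ===== PORT B =====
def valB (n i : Int) : Int :=
  if PySem.Int.mod n 2 == 0 then
    if i < n - 2 then (if PySem.Int.mod i 2 == 0 then i + 2 else i) else i + 1
  else if PySem.Int.mod i 2 == 1 && decide (3 ≤ i) && decide (i < n - 2) then i + 2
  else if PySem.Int.mod i 2 == 0 && decide (4 ≤ i) && decide (i < n - 1) then i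
  else i + 1

def solve_alt (n : Int) : String :=
  PySem.Str.join " " ((PySem.List.pyRange 0 n 1).map (fun i => PySem.Int.toStr (valB n i)))

-- ===== PRECONDITION & SPEC =====
def Spec_solve (n : Int) (out : String) : Prop := out = solve_alt n
instance (n : Int) (out : String) : Decidable (Spec_solve n out) := by unfold Spec_solve; infer_instance

-- ===== CLAIM (what is proved, stated in full; the proofs are below) =====
def Claim_equal_solve : Prop := ∀ (n : Int), Dom_solve n → Spec_solve n (solve n)

-- ===== LEMMAS AND PROOFS =====

-- getD after set
lemma getD_set (l : List Int) (k : Nat) (v : Int) (j : Nat) (d : Int) :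
    (l.set k v).getD j d = if j = k ∧ k < l.length then v else l.getD j d := by
  simp [List.getD, List.getElem?_set]
  split_ifs with h1 h2 h3 <;> simp_all

lemma length_swapStep (r : List Int) (i : Int) (hi : 0 ≤ i) :
    (swapStep r i).length = r.length := by
  unfold swapStep
  rw [PySem.List.pySetD_of_nonneg _ _ hi, PySem.List.pySetD_of_nonneg _ _ (by omega : (0:Int) ≤ i + 1)]
  simp

lemma swapStep_getD (r : List Int) (i : Int) (hi : 0 ≤ i) (hlt : i.toNat + 1 < r.length)
    (j : Nat) (d : Int) :
    (swapStep r i).getD j d =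
      if j = i.toNat then r.getD (i.toNat + 1) d
      else if j = i.toNat + 1 then r.getD i.toNat d
      else r.getD j d := by
  unfold swapStep
  rw [PySem.List.pySetD_of_nonneg _ _ hi, PySem.List.pySetD_of_nonneg _ _ (by omega : (0:Int) ≤ i + 1)]
  rw [PySem.List.pyGetD_of_nonneg _ _ hi, PySem.List.pyGetD_of_nonneg _ _ (by omega : (0:Int) ≤ i + 1)]
  have h1 : (i + 1).toNat = i.toNat + 1 := by omega
  rw [h1, getD_set, getD_set]
  simp only [List.length_set]
  have e1 : r.getD i.toNat 0 = r.getD i.toNat d := by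
    rw [List.getD_eq_getElem r 0 (by omega), List.getD_eq_getElem r d (by omega)]
  have e2 : r.getD (i.toNat + 1) 0 = r.getD (i.toNat + 1) d := by
    rw [List.getD_eq_getElem r 0 hlt, List.getD_eq_getElem r d hlt]
  split_ifs <;> simp_all <;> omega

lemma length_fold_swap (idxs : List Int) (r : List Int)
    (hmem : ∀ i ∈ idxs, 0 ≤ i) :
    (idxs.foldl swapStep r).length = r.length := by
  induction idxs generalizing r with
  | nil => rfl
  | cons i rest ih =>
    have h0 : 0 ≤ i := hmem i (by simp)
    rw [List.foldl_cons, ih _ (fun x hx => hmem x (by simp [hx])), length_swapStep r i h0]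

lemma fold_swap_getD (idxs : List Int) (r : List Int)
    (hmem : ∀ i ∈ idxs, 0 ≤ i ∧ i.toNat + 1 < r.length)
    (hpw : idxs.Pairwise (fun a b => a + 1 < b)) (j : Nat) (d : Int) :
    (idxs.foldl swapStep r).getD j d =
      if (j : Int) ∈ idxs then r.getD (j + 1) d
      else if ((j : Int) - 1) ∈ idxs then r.getD (j - 1) d
      else r.getD j d := by
  induction idxs generalizing r with
  | nil => simp
  | cons i rest ih =>
    obtain ⟨h0, hl⟩ := hmem i (by simp)
    have hlen : (swapStep r i).length = r.length := length_swapStep r i h0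
    have hrest : ∀ x ∈ rest, 0 ≤ x ∧ x.toNat + 1 < (swapStep r i).length := by
      intro x hx; rw [hlen]; exact hmem x (by simp [hx])
    have hgt : ∀ x ∈ rest, i + 1 < x := by
      intro x hx; exact (List.pairwise_cons.mp hpw).1 x hx
    rw [List.foldl_cons, ih _ hrest (List.pairwise_cons.mp hpw).2]
    have hsw := swapStep_getD r i h0 hl
    by_cases hj1 : (j : Int) ∈ rest
    · have : i + 1 < (j : Int) := hgt _ hj1
      rw [if_pos hj1, hsw (j + 1) d, if_neg (by omega), if_neg (by omega),
        if_pos (by simp [hj1])]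
    · by_cases hj2 : ((j : Int) - 1) ∈ rest
      · have hx : i + 1 < (j : Int) - 1 := hgt _ hj2
        rw [if_neg hj1, if_pos hj2, hsw (j - 1) d, if_neg (by omega), if_neg (by omega),
          if_neg (by simp only [List.mem_cons]; push Not; exact ⟨by omega, hj1⟩),
          if_pos (by simp only [List.mem_cons]; exact Or.inr hj2)]
      · rw [if_neg hj1, if_neg hj2, hsw j d]
        by_cases hji : j = i.toNat
        · rw [if_pos hji, if_pos (by simp only [List.mem_cons]; exact Or.inl (by omega))]
          rw [hji]
        · by_cases hji1 : j = i.toNat + 1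
          · rw [if_neg hji, if_pos hji1,
              if_neg (by simp only [List.mem_cons]; push Not; exact ⟨by omega, hj1⟩),
              if_pos (by simp only [List.mem_cons]; exact Or.inl (by omega))]
            have hjj : j - 1 = i.toNat := by omega
            rw [hjj]
          · rw [if_neg hji, if_neg hji1,
              if_neg (by simp only [List.mem_cons]; push Not; exact ⟨by omega, hj1⟩),
              if_neg (by simp only [List.mem_cons]; push Not; exact ⟨by omega, hj2⟩)]

lemma pairwise_pyRange_two (a b : Int) :
    (PySem.List.pyRange a b 2).Pairwise (fun x y => x + 1 < y) := by
  rw [PySem.List.pyRange_of_pos a b (by omega)]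
  exact List.Pairwise.map _ (fun x y h => by omega) List.pairwise_lt_range

lemma ident_getD (n : Int) (j : Nat) (hj : j < n.toNat) :
    ((PySem.List.pyRange 0 n 1).map (fun i => i + 1)).getD j 0 = (j : Int) + 1 := by
  rw [PySem.List.pyRange_one]
  simp [List.getD, hj]

lemma lists_eq (n : Int) :
    (if PySem.Int.mod n 2 == 0 then
        (PySem.List.pyRange 0 (n - 2) 2).foldl swapStep
          ((PySem.List.pyRange 0 n 1).map (fun i => i + 1))
      else
        (PySem.List.pyRange 3 (n - 2) 2).foldl swapStep
          ((PySem.List.pyRange 0 n 1).map (fun i => i + 1))) =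
      (PySem.List.pyRange 0 n 1).map (valB n) := by
  have h02 : (0:Int) < 2 := by omega
  have hmod : PySem.Int.mod n 2 = n % 2 := PySem.Int.mod_eq_emod_of_pos h02
  have hlen : ((PySem.List.pyRange 0 n 1).map (fun i => i + 1)).length = n.toNat := by
    simp [PySem.List.length_pyRange_one]
  have hrhs : ∀ k : Nat, k < n.toNat →
      ((PySem.List.pyRange 0 n 1).map (valB n)).getD k 0 = valB n (k : Int) := by
    intro k hk
    rw [PySem.List.pyRange_one]
    simp [List.getD, hk]
  rcases Int.emod_two_eq n with hpar | hpar <;>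
    simp only [hmod, hpar, beq_iff_eq] <;> norm_num
  · -- even n, swaps at range(0, n-2, 2)
    have hmem : ∀ i ∈ PySem.List.pyRange 0 (n - 2) 2,
        0 ≤ i ∧ i.toNat + 1 < ((PySem.List.pyRange 0 n 1).map (fun i => i + 1)).length := by
      intro x hx
      have := (PySem.List.mem_pyRange_iff_of_pos h02 x).mp hx
      rw [hlen]; omega
    apply List.ext_getElem
    · rw [length_fold_swap _ _ (fun x hx => (hmem x hx).1), List.length_map, List.length_map]
    · intro k h1 h2
      have hk : k < n.toNat := by
        rw [List.length_map, PySem.List.length_pyRange_one] at h2; omega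
      rw [← List.getD_eq_getElem _ 0 h1, ← List.getD_eq_getElem _ 0 h2,
        fold_swap_getD _ _ hmem (pairwise_pyRange_two 0 (n - 2)) k 0, hrhs k hk]
      have hm1 := PySem.List.mem_pyRange_iff_of_pos (a := 0) (b := n - 2) h02 (k : Int)
      have hm2 := PySem.List.mem_pyRange_iff_of_pos (a := 0) (b := n - 2) h02 ((k : Int) - 1)
      by_cases c1 : (k : Int) ∈ PySem.List.pyRange 0 (n - 2) 2
      · obtain ⟨_, hb2, hb3⟩ := hm1.mp c1
        rw [if_pos c1, ident_getD n (k + 1) (by omega)]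
        unfold valB
        simp only [hmod, hpar, beq_iff_eq,
          PySem.Int.mod_eq_emod_of_pos h02 (a := (k : Int))]
        norm_num
        split_ifs <;> omega
      · by_cases c2 : ((k : Int) - 1) ∈ PySem.List.pyRange 0 (n - 2) 2
        · obtain ⟨hb1, hb2, hb3⟩ := hm2.mp c2
          have hnb : ¬((0:Int) ≤ (k : Int) ∧ (k : Int) < n - 2 ∧ (2:Int) ∣ (k : Int) - 0) :=
            fun h => c1 (hm1.mpr h)
          rw [if_neg c1, if_pos c2, ident_getD n (k - 1) (by omega)]
          unfold valB
          simp only [hmod, hpar, beq_iff_eq,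
            PySem.Int.mod_eq_emod_of_pos h02 (a := (k : Int))]
          norm_num
          have hc : ((k - 1 : Nat) : Int) = (k : Int) - 1 := by omega
          rw [hc]
          split_ifs <;> omega
        · have hnb1 : ¬((0:Int) ≤ (k : Int) ∧ (k : Int) < n - 2 ∧ (2:Int) ∣ (k : Int) - 0) :=
            fun h => c1 (hm1.mpr h)
          have hnb2 : ¬((0:Int) ≤ (k : Int) - 1 ∧ (k : Int) - 1 < n - 2 ∧ (2:Int) ∣ (k : Int) - 1 - 0) :=
            fun h => c2 (hm2.mpr h)
          rw [if_neg c1, if_neg c2, ident_getD n k hk]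
          unfold valB
          simp only [hmod, hpar, beq_iff_eq,
            PySem.Int.mod_eq_emod_of_pos h02 (a := (k : Int))]
          norm_num
          split_ifs <;> omega
  · -- odd n, swaps at range(3, n-2, 2)
    have hmem : ∀ i ∈ PySem.List.pyRange 3 (n - 2) 2,
        0 ≤ i ∧ i.toNat + 1 < ((PySem.List.pyRange 0 n 1).map (fun i => i + 1)).length := by
      intro x hx
      have := (PySem.List.mem_pyRange_iff_of_pos h02 x).mp hx
      rw [hlen]; omega
    apply List.ext_getElem
    · rw [length_fold_swap _ _ (fun x hx => (hmem x hx).1), List.length_map, List.length_map]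
    · intro k h1 h2
      have hk : k < n.toNat := by
        rw [List.length_map, PySem.List.length_pyRange_one] at h2; omega
      rw [← List.getD_eq_getElem _ 0 h1, ← List.getD_eq_getElem _ 0 h2,
        fold_swap_getD _ _ hmem (pairwise_pyRange_two 3 (n - 2)) k 0, hrhs k hk]
      have hm1 := PySem.List.mem_pyRange_iff_of_pos (a := 3) (b := n - 2) h02 (k : Int)
      have hm2 := PySem.List.mem_pyRange_iff_of_pos (a := 3) (b := n - 2) h02 ((k : Int) - 1)
      by_cases c1 : (k : Int) ∈ PySem.List.pyRange 3 (n - 2) 2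
      · obtain ⟨hb1, hb2, hb3⟩ := hm1.mp c1
        rw [if_pos c1, ident_getD n (k + 1) (by omega)]
        unfold valB
        simp only [hmod, hpar, beq_iff_eq, Bool.and_eq_true, decide_eq_true_eq,
          PySem.Int.mod_eq_emod_of_pos h02 (a := (k : Int))]
        norm_num
        split_ifs <;> omega
      · by_cases c2 : ((k : Int) - 1) ∈ PySem.List.pyRange 3 (n - 2) 2
        · obtain ⟨hb1, hb2, hb3⟩ := hm2.mp c2
          have hnb : ¬((3:Int) ≤ (k : Int) ∧ (k : Int) < n - 2 ∧ (2:Int) ∣ (k : Int) - 3) :=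
            fun h => c1 (hm1.mpr h)
          rw [if_neg c1, if_pos c2, ident_getD n (k - 1) (by omega)]
          unfold valB
          simp only [hmod, hpar, beq_iff_eq, Bool.and_eq_true, decide_eq_true_eq,
            PySem.Int.mod_eq_emod_of_pos h02 (a := (k : Int))]
          norm_num
          have hc : ((k - 1 : Nat) : Int) = (k : Int) - 1 := by omega
          rw [hc]
          split_ifs <;> omega
        · have hnb1 : ¬((3:Int) ≤ (k : Int) ∧ (k : Int) < n - 2 ∧ (2:Int) ∣ (k : Int) - 3) :=
            fun h => c1 (hm1.mpr h)
          have hnb2 : ¬((3:Int) ≤ (k : Int) - 1 ∧ (k : Int) - 1 < n - 2 ∧ (2:Int) ∣ (k : Int) - 1 - 3) :=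
            fun h => c2 (hm2.mpr h)
          rw [if_neg c1, if_neg c2, ident_getD n k hk]
          unfold valB
          simp only [hmod, hpar, beq_iff_eq, Bool.and_eq_true, decide_eq_true_eq,
            PySem.Int.mod_eq_emod_of_pos h02 (a := (k : Int))]
          norm_num
          split_ifs <;> omega

-- ===== VERDICT (by name: the statement is the Claim_ definition above) =====
theorem solve_spec : Claim_equal_solve := by
  intro n _
  show solve n = solve_alt n
  show PySem.Str.join " " ((if PySem.Int.mod n 2 == 0 then
        (PySem.List.pyRange 0 (n - 2) 2).foldl swapStep
          ((PySem.List.pyRange 0 n 1).map (fun i => i + 1))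
      else
        (PySem.List.pyRange 3 (n - 2) 2).foldl swapStep
          ((PySem.List.pyRange 0 n 1).map (fun i => i + 1))).map PySem.Int.toStr) = solve_alt n
  rw [lists_eq n]
  unfold solve_alt
  simp only [List.map_map]
  rfl
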